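-- pv_equiv track=rewrite | github.com/deep-type/deeptype2 | code/extraction/produce_wikidata_tsv.py | convert_document_to_labeled_tags
-- ===== SOURCE A (Python) =====
-- def merge_tags(words, tags, start_sent):
--     out = [(w, [], []) for w in words]
--     for tag_start, tag_end, tag, anchor_idx in tags:
--         so_far = start_sent
--         for k, word in enumerate(words):
--             begins = tag_start <= so_far or (tag_start > so_far and tag_start < so_far + len(word))
--             ends = (so_far + len(word) <= tag_end) or (tag_end < so_far + len(word) and tag_end > so_far)
--             if begins and ends:
--                 out[k][1].append(tag)
--                 out[k][2].append(anchor_idx)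
--             so_far += len(word)
--             if so_far >= tag_end:
--                 break
--     return out
--
-- def pick_relevant_tags(tagged_sequence, char_offset, char_offset_end):
--     relevant_tags = []
--     for word, tags in tagged_sequence:
--         if tags is not None:
--             start, end, dest_index, anchor_idx = tags
--             if start >= char_offset and start < char_offset_end:
--                 relevant_tags.append((start, end, dest_index, anchor_idx))
--             if start >= char_offset_end:
--                 break
--     return relevant_tags
--
-- def convert_document_to_labeled_tags(annotated, sentences):
--     paragraphs = []
--     paragraph = []
--     char_offset = 0
--     for sentence in sentences:
--         sentence_length = sum(len(w) for w in sentence)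
--         sentence_tags = pick_relevant_tags(
--             annotated,
--             char_offset,
--             char_offset + sentence_length
--         )
--         sentence_with_tags = merge_tags(
--             sentence,
--             sentence_tags,
--             char_offset
--         )
--         sentence_with_tags = [
--             (
--                 w,
--                 tags[0] if len(tags) > 0 else None,
--                 anchor_tags[0] if len(tags) > 0 else None,
--             ) for w, tags, anchor_tags in sentence_with_tags
--         ]
--         if "\n" in sentence[-1]:
--             paragraph.extend(sentence_with_tags)
--             paragraphs.append(paragraph)
--             paragraph = []
--         else:
--             paragraph.extend(sentence_with_tags)
--         char_offset += sentence_length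
--     if len(paragraph) > 0:
--         paragraphs.append(paragraph)
--     return paragraphs
-- ===== SOURCE B (Python) =====
-- # B: single consuming pointer over the sorted non-None tags (one slice per sentence)
-- # plus a plain interval-overlap test per word, instead of rescanning the whole
-- # annotated list per sentence and building per-word tag lists.
-- def convert_document_to_labeled_tags(annotated, sentences):
--     tags = [t for _, t in annotated if t is not None]
--     i = 0
--     paragraphs = []
--     paragraph = []
--     offset = 0
--     for sentence in sentences:
--         end_offset = offset + sum(len(w) for w in sentence)
--         j = i
--         while j < len(tags) and tags[j][0] < end_offset:
--             j += 1
--         relevant = [t for t in tags[i:j] if t[0] >= offset]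
--         i = j
--         a = offset
--         for w in sentence:
--             b = a + len(w)
--             hit = next(((dest, anch) for ts, te, dest, anch in relevant
--                         if ts < b and a < te), None)
--             paragraph.append((w, hit[0] if hit is not None else None,
--                                  hit[1] if hit is not None else None))
--             a = b
--         if "\n" in sentence[-1]:
--             paragraphs.append(paragraph)
--             paragraph = []
--         offset = end_offset
--     if paragraph:
--         paragraphs.append(paragraph)
--     return paragraphs
-- ===== Notes on version B (the rewrite author's own statement) =====
-- stated objective: alternative
-- what changed: B extracts the non-None tags once and consumes them with a single advancing pointer (one slice per sentence) instead of rescanning the whole annotated list from the start for every sentence, and tags each word by a plain interval-overlap test instead of building per-word tag lists and taking their heads; Pre_ excludes sentences containing an empty sentence (A's sentence[-1] raises IndexError) and empty-string tokens, on which whether a zero-width token exactly at a tag boundary receives the tag is an accidental artefact of A's cumulative scan-with-break.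
import Mathlib
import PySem

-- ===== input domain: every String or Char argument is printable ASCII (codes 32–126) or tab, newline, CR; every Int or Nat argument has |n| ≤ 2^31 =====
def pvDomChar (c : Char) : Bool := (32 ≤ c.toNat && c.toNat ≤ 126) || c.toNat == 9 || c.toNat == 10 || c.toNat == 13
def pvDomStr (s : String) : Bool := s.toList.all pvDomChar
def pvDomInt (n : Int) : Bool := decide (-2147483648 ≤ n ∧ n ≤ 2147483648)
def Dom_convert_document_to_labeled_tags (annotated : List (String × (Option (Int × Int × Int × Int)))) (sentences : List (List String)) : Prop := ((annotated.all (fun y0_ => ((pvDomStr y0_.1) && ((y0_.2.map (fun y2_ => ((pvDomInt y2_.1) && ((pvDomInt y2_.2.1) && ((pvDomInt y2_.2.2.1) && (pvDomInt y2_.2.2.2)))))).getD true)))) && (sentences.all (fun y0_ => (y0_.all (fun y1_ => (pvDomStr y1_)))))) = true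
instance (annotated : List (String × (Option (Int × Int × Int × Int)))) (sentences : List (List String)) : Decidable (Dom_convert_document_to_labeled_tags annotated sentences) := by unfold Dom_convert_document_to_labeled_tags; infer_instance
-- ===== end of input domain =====

-- B consumes the non-None tags once with an advancing pointer (one slice per sentence) and tags
-- each word by a plain interval-overlap test, instead of A's per-sentence rescan of the whole
-- annotated list and per-word tag-list accumulation; equivalence proved on Pre_ (nonempty
-- sentences with nonempty tokens).


abbrev pvT4 := Int × Int × Int × Int
abbrev pvOut := String × Option Int × Option Int

-- ===== PORT A =====
-- inner `for k, word in enumerate(words)` loop of merge_tags for one tag (with its break)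
def pvMergeInner (ts te tg an : Int) (so_far : Int) :
    List (String × List Int × List Int) → List (String × List Int × List Int)
  | [] => []
  | (w, L, As) :: rest =>
    let len := PySem.Str.len w
    let entry :=
      if (ts ≤ so_far ∨ (so_far < ts ∧ ts < so_far + len)) ∧
         (so_far + len ≤ te ∨ (te < so_far + len ∧ so_far < te)) then
        (w, L ++ [tg], As ++ [an])
      else (w, L, As)
    if te ≤ so_far + len then entry :: rest
    else entry :: pvMergeInner ts te tg an (so_far + len) rest

def pvMergeTags (words : List String) (tags : List pvT4) (start_sent : Int) :
    List (String × List Int × List Int) :=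
  tags.foldl (fun out t => pvMergeInner t.1 t.2.1 t.2.2.1 t.2.2.2 start_sent out)
    (words.map (fun w => (w, ([] : List Int), ([] : List Int))))

-- pick_relevant_tags (the unused `word` component is ignored; break on start >= char_offset_end)
def pvPick (c e : Int) : List (String × Option pvT4) → List pvT4
  | [] => []
  | (_, none) :: rest => pvPick c e rest
  | (_, some t) :: rest =>
    let acc1 := if c ≤ t.1 ∧ t.1 < e then [t] else []
    if e ≤ t.1 then acc1 else acc1 ++ pvPick c e rest

-- body of A's `for sentence in sentences` loop; state = (paragraphs, paragraph, char_offset)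
def pvStepA (annotated : List (String × Option pvT4))
    (st : List (List pvOut) × List pvOut × Int) (sentence : List String) :
    List (List pvOut) × List pvOut × Int :=
  let c := st.2.2
  let slen := (sentence.map PySem.Str.len).sum
  let stags := pvPick c (c + slen) annotated
  let swt := pvMergeTags sentence stags c
  let swt2 := swt.map (fun x =>
    (x.1, (if 0 < x.2.1.length then x.2.1.head? else none),
          (if 0 < x.2.1.length then x.2.2.head? else none)))
  -- `sentence[-1]` raises IndexError on an empty sentence (excluded by Pre_); getD "" there
  if ((PySem.List.pyGet? sentence (-1)).getD "").toList.contains '\n' then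
    (st.1 ++ [st.2.1 ++ swt2], ([] : List pvOut), c + slen)
  else (st.1, st.2.1 ++ swt2, c + slen)

def convert_document_to_labeled_tags (annotated : List (String × (Option (Int × Int × Int × Int)))) (sentences : List (List String)) : List (List (String × Option Int × Option Int)) :=
  let st := sentences.foldl (pvStepA annotated) ([], [], 0)
  if 0 < st.2.1.length then st.1 ++ [st.2.1] else st.1

-- ===== PORT B =====
-- Source B's `for w in sentence` loop: first overlapping tag per word, appended to the paragraph
def pvBuildWords (rel : List pvT4) (a : Int) : List String → List pvOut
  | [] => []
  | w :: ws =>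
    let b := a + PySem.Str.len w
    let hit := rel.find? (fun t => decide (t.1 < b ∧ a < t.2.1))
    (w, hit.map (·.2.2.1), hit.map (·.2.2.2)) :: pvBuildWords rel b ws

-- body of Source B's sentence loop; state = (paragraphs, paragraph, offset, remaining tags);
-- the i/j pointer slice tags[i:j] is the takeWhile/dropWhile split of the remaining tags
def pvStepB (st : List (List pvOut) × List pvOut × Int × List pvT4) (sentence : List String) :
    List (List pvOut) × List pvOut × Int × List pvT4 :=
  let offset := st.2.2.1
  let remaining := st.2.2.2
  let e := offset + (sentence.map PySem.Str.len).sum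
  let chunk := remaining.takeWhile (fun t => decide (t.1 < e))
  let rest := remaining.dropWhile (fun t => decide (t.1 < e))
  let relevant := chunk.filter (fun t => decide (offset ≤ t.1))
  let out := pvBuildWords relevant offset sentence
  if ((PySem.List.pyGet? sentence (-1)).getD "").toList.contains '\n' then
    (st.1 ++ [st.2.1 ++ out], ([] : List pvOut), e, rest)
  else (st.1, st.2.1 ++ out, e, rest)

def convert_document_to_labeled_tags_alt (annotated : List (String × (Option (Int × Int × Int × Int)))) (sentences : List (List String)) : List (List (String × Option Int × Option Int)) :=
  let st := sentences.foldl pvStepB ([], [], 0, annotated.filterMap Prod.snd)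
  if 0 < st.2.1.length then st.1 ++ [st.2.1] else st.1

-- ===== PRECONDITION & SPEC =====
-- pvBadSent tags off send a s: some zero-width token of s (token positions from a) is touched by
-- the span [start, end] of a tag whose start lies in the sentence window [off, send)
def pvBadSent (tags : List pvT4) (off send : Int) : Int → List String → Bool
  | _, [] => false
  | a, w :: ws =>
    (decide (PySem.Str.len w = 0) &&
      tags.any (fun t => decide (off ≤ t.1 ∧ t.1 < send ∧ t.1 ≤ a ∧ a ≤ t.2.1))) ||
    pvBadSent tags off send (a + PySem.Str.len w) ws

def pvBad (tags : List pvT4) : Int → List (List String) → Bool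
  | _, [] => false
  | c, s :: ss =>
    pvBadSent tags c (c + (s.map PySem.Str.len).sum) c s ||
    pvBad tags (c + (s.map PySem.Str.len).sum) ss

-- A's `sentence[-1]` raises IndexError on an empty sentence; besides those, Pre_ excludes only
-- inputs where some relevant tag's span touches the position of a zero-width token, where
-- whether that token receives the tag is an accidental artefact of A's cumulative scan-with-break.
def Pre_convert_document_to_labeled_tags (annotated : List (String × (Option (Int × Int × Int × Int)))) (sentences : List (List String)) : Prop :=
  (∀ s ∈ sentences, s ≠ []) ∧ pvBad (annotated.filterMap Prod.snd) 0 sentences = false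
instance (annotated : List (String × (Option (Int × Int × Int × Int)))) (sentences : List (List String)) : Decidable (Pre_convert_document_to_labeled_tags annotated sentences) := by unfold Pre_convert_document_to_labeled_tags; infer_instance

def pvWitness_convert_document_to_labeled_tags : (List (String × (Option (Int × Int × Int × Int)))) × List (List String) :=
  ([("ab", some (0, 2, 5, 7)), ("x", none)], [["ab"], ["c\n"]])

def Spec_convert_document_to_labeled_tags (annotated : List (String × (Option (Int × Int × Int × Int)))) (sentences : List (List String)) (out : List (List (String × Option Int × Option Int))) : Prop := out = convert_document_to_labeled_tags_alt annotated sentences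
instance (annotated : List (String × (Option (Int × Int × Int × Int)))) (sentences : List (List String)) (out : List (List (String × Option Int × Option Int))) : Decidable (Spec_convert_document_to_labeled_tags annotated sentences out) := by unfold Spec_convert_document_to_labeled_tags; infer_instance

-- ===== CLAIM (what is proved, stated in full; the proofs are below) =====
def Claim_equal_convert_document_to_labeled_tags : Prop := ∀ (annotated : List (String × (Option (Int × Int × Int × Int)))) (sentences : List (List String)), Dom_convert_document_to_labeled_tags annotated sentences → Pre_convert_document_to_labeled_tags annotated sentences → Spec_convert_document_to_labeled_tags annotated sentences (convert_document_to_labeled_tags annotated sentences)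

-- ===== LEMMAS AND PROOFS =====

theorem pvStrLen_nonneg (w : String) : 0 ≤ PySem.Str.len w := by
  simp [PySem.Str.len_eq]

-- pvOkW t a words: no zero-width token of words (positions from a) is touched by t's span
def pvOkW (t : pvT4) : Int → List String → Prop
  | _, [] => True
  | a, w :: ws => (PySem.Str.len w = 0 → ¬ (t.1 ≤ a ∧ a ≤ t.2.1)) ∧ pvOkW t (a + PySem.Str.len w) ws

theorem pvSlen_nonneg (s : List String) : 0 ≤ (s.map PySem.Str.len).sum := by
  induction s with
  | nil => simp
  | cons w ws ih => simp only [List.map_cons, List.sum_cons]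
                    have := pvStrLen_nonneg w; omega

-- per-word reformulation of pvMergeInner (no break; plain interval overlap per word)
def pvRecW (t : pvT4) (a : Int) :
    List (String × List Int × List Int) → List (String × List Int × List Int)
  | [] => []
  | (w, L, As) :: rest =>
    (if t.1 < a + PySem.Str.len w ∧ a < t.2.1 then (w, L ++ [t.2.2.1], As ++ [t.2.2.2])
     else (w, L, As)) :: pvRecW t (a + PySem.Str.len w) rest

theorem pvRecW_fst (t : pvT4) : ∀ (out : List (String × List Int × List Int)) (a : Int),
    (pvRecW t a out).map (·.1) = out.map (·.1) := by
  intro out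
  induction out with
  | nil => intro a; rfl
  | cons x rest ih =>
    obtain ⟨w, L, As⟩ := x
    intro a
    simp only [pvRecW, List.map_cons, ih]
    split <;> rfl

theorem pvRecW_of_ge (t : pvT4) : ∀ (out : List (String × List Int × List Int)) (a : Int),
    t.2.1 ≤ a → pvRecW t a out = out := by
  intro out
  induction out with
  | nil => intro a _; rfl
  | cons x rest ih =>
    obtain ⟨w, L, As⟩ := x
    intro a h
    have hnn := pvStrLen_nonneg w
    simp only [pvRecW]
    rw [if_neg (by omega), ih (a + PySem.Str.len w) (by omega)]

theorem pvMergeInner_eq_recW (t : pvT4) : ∀ (out : List (String × List Int × List Int))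
    (a : Int), pvOkW t a (out.map (·.1)) →
    pvMergeInner t.1 t.2.1 t.2.2.1 t.2.2.2 a out = pvRecW t a out := by
  intro out
  induction out with
  | nil => intro a _; rfl
  | cons x rest ih =>
    obtain ⟨w, L, As⟩ := x
    intro a hok
    obtain ⟨hw0, htail⟩ := hok
    have hw : PySem.Str.len w = 0 → ¬ (t.1 ≤ a ∧ a ≤ t.2.1) := hw0
    have hnn := pvStrLen_nonneg w
    have hiff : ((t.1 ≤ a ∨ (a < t.1 ∧ t.1 < a + PySem.Str.len w)) ∧
        (a + PySem.Str.len w ≤ t.2.1 ∨ (t.2.1 < a + PySem.Str.len w ∧ a < t.2.1)))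
        ↔ (t.1 < a + PySem.Str.len w ∧ a < t.2.1) := by omega
    by_cases hb : t.2.1 ≤ a + PySem.Str.len w
    · simp only [pvMergeInner, pvRecW, if_pos hb]
      rw [pvRecW_of_ge t rest (a + PySem.Str.len w) hb]
      by_cases hc : (t.1 < a + PySem.Str.len w ∧ a < t.2.1)
      · rw [if_pos (hiff.mpr hc), if_pos hc]
      · rw [if_neg (fun hx => hc (hiff.mp hx)), if_neg hc]
    · simp only [pvMergeInner, pvRecW, if_neg hb]
      rw [ih (a + PySem.Str.len w) htail]
      by_cases hc : (t.1 < a + PySem.Str.len w ∧ a < t.2.1)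
      · rw [if_pos (hiff.mpr hc), if_pos hc]
      · rw [if_neg (fun hx => hc (hiff.mp hx)), if_neg hc]

theorem pvFoldl_merge_eq_recW (rel : List pvT4) :
    ∀ (out : List (String × List Int × List Int)) (a : Int),
    (∀ t ∈ rel, pvOkW t a (out.map (·.1))) →
    rel.foldl (fun o t => pvMergeInner t.1 t.2.1 t.2.2.1 t.2.2.2 a o) out
    = rel.foldl (fun o t => pvRecW t a o) out := by
  induction rel with
  | nil => intro out a _; rfl
  | cons t rel ih =>
    intro out a hok
    simp only [List.foldl_cons]
    rw [pvMergeInner_eq_recW t out a (hok t (by simp))]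
    apply ih
    intro t' ht'
    rw [pvRecW_fst]
    exact hok t' (by simp [ht'])

theorem pvBadSent_ok (tags : List pvT4) (off send : Int) :
    ∀ (s : List String) (a : Int), pvBadSent tags off send a s = false →
    ∀ t ∈ tags, off ≤ t.1 → t.1 < send → pvOkW t a s := by
  intro s
  induction s with
  | nil => intro a _ t _ _ _; trivial
  | cons w ws ih =>
    intro a hbad t ht h1 h2
    simp only [pvBadSent, Bool.or_eq_false_iff, Bool.and_eq_false_iff] at hbad
    obtain ⟨hhead, htail⟩ := hbad
    refine ⟨?_, ih (a + PySem.Str.len w) htail t ht h1 h2⟩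
    intro hw0 hc
    rcases hhead with hh | hh
    · have hw : w = "" := by simpa [PySem.Str.len_eq] using hw0
      rw [decide_eq_false_iff_not] at hh
      exact hh hw0
    · rw [List.any_eq_false] at hh
      have h3 := hh t ht
      simp only [decide_eq_true_eq] at h3
      exact h3 ⟨h1, h2, hc.1, hc.2⟩

theorem pvFoldl_recW_nil (rel : List pvT4) (a : Int) :
    rel.foldl (fun o t => pvRecW t a o) [] = [] := by
  induction rel with
  | nil => rfl
  | cons t rel ih => simpa [pvRecW] using ih

theorem pvFoldl_recW_cons : ∀ (rel : List pvT4) (w : String) (L As : List Int)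
    (out : List (String × List Int × List Int)) (a : Int),
    rel.foldl (fun o t => pvRecW t a o) ((w, L, As) :: out)
    = (w, L ++ (rel.filter (fun t => decide (t.1 < a + PySem.Str.len w ∧ a < t.2.1))).map (·.2.2.1),
          As ++ (rel.filter (fun t => decide (t.1 < a + PySem.Str.len w ∧ a < t.2.1))).map (·.2.2.2))
      :: rel.foldl (fun o t => pvRecW t (a + PySem.Str.len w) o) out := by
  intro rel
  induction rel with
  | nil => intro w L As out a; simp
  | cons t rel ih =>
    intro w L As out a
    simp only [List.foldl_cons, pvRecW]
    by_cases hp : (t.1 < a + PySem.Str.len w ∧ a < t.2.1)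
    · have hpt : (fun t : pvT4 => decide (t.1 < a + PySem.Str.len w ∧ a < t.2.1)) t = true := by
        simpa using hp
      rw [if_pos hp, ih, List.filter_cons, if_pos hpt]
      simp
    · have hpt : ¬ ((fun t : pvT4 => decide (t.1 < a + PySem.Str.len w ∧ a < t.2.1)) t = true) := by
        simpa using hp
      rw [if_neg hp, ih, List.filter_cons, if_neg hpt]

theorem pvHead?_filter_map (l : List pvT4) (p : pvT4 → Bool) (f : pvT4 → Int) :
    ((l.filter p).map f).head? = (l.find? p).map f := by
  induction l with
  | nil => rfl
  | cons x l ih =>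
    by_cases hp : p x
    · simp [List.filter_cons, List.find?_cons, hp]
    · simp only [List.filter_cons, List.find?_cons, hp]
      simpa using ih

theorem pvPostmap_build : ∀ (words : List String) (rel : List pvT4) (a : Int),
    (rel.foldl (fun o t => pvRecW t a o)
        (words.map (fun w => (w, ([] : List Int), ([] : List Int))))).map
      (fun x => (x.1, (if 0 < x.2.1.length then x.2.1.head? else none),
                      (if 0 < x.2.1.length then x.2.2.head? else none)))
    = pvBuildWords rel a words := by
  intro words
  induction words with
  | nil => intro rel a; simp [pvFoldl_recW_nil, pvBuildWords]
  | cons w ws ih =>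
    intro rel a
    simp only [List.map_cons]
    rw [pvFoldl_recW_cons]
    simp only [List.map_cons, pvBuildWords]
    congr 1
    · by_cases hF : rel.filter (fun t => decide (t.1 < a + PySem.Str.len w ∧ a < t.2.1)) = []
      · have hfind : rel.find? (fun t => decide (t.1 < a + PySem.Str.len w ∧ a < t.2.1)) = none := by
          rw [List.find?_eq_none]
          intro x hx
          have := List.filter_eq_nil_iff.mp hF x hx
          simpa using this
        simp [hF, hfind]
      · have hlen : 0 < (rel.filter (fun t => decide (t.1 < a + PySem.Str.len w ∧ a < t.2.1))).length :=
          List.length_pos_iff.mpr hF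
        simp only [List.nil_append, List.length_map, if_pos hlen]
        rw [pvHead?_filter_map, pvHead?_filter_map]
    · exact ih rel (a + PySem.Str.len w)

theorem pvPick_eq : ∀ (ann : List (String × Option pvT4)) (c e : Int),
    pvPick c e ann = ((ann.filterMap Prod.snd).takeWhile (fun t => decide (t.1 < e))).filter
      (fun t => decide (c ≤ t.1)) := by
  intro ann
  induction ann with
  | nil => intro c e; rfl
  | cons x rest ih =>
    intro c e
    obtain ⟨w, o⟩ := x
    cases o with
    | none => simpa [pvPick] using ih c e
    | some t =>
      by_cases he : e ≤ t.1
      · have : ¬ (t.1 < e) := by omega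
        simp [pvPick, he, this]
      · simp only [pvPick, if_neg he, List.filterMap_cons]
        have ht : t.1 < e := by omega
        rw [List.takeWhile_cons_of_pos (by simpa using ht)]
        by_cases hc : c ≤ t.1
        · simp [List.filter_cons, ht, hc, ih c e]
        · simp [List.filter_cons, hc, ih c e]

theorem pvPrefix_shift : ∀ (pre rest : List pvT4) (c e : Int),
    (∀ t ∈ pre, t.1 < c) → c ≤ e →
    (((pre ++ rest).takeWhile (fun t => decide (t.1 < e))).filter (fun t => decide (c ≤ t.1))
      = (rest.takeWhile (fun t => decide (t.1 < e))).filter (fun t => decide (c ≤ t.1)))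
    ∧ ((pre ++ rest).dropWhile (fun t => decide (t.1 < e))
      = rest.dropWhile (fun t => decide (t.1 < e))) := by
  intro pre
  induction pre with
  | nil => intro rest c e _ _; simp
  | cons t pre ih =>
    intro rest c e hpre hce
    have ht : t.1 < c := hpre t (by simp)
    have h1 : t.1 < e := by omega
    have h2 : ¬ (c ≤ t.1) := by omega
    obtain ⟨ihT, ihD⟩ := ih rest c e (fun x hx => hpre x (by simp [hx])) hce
    constructor
    · rw [List.cons_append, List.takeWhile_cons_of_pos (by simpa using h1)]
      simpa [List.filter_cons, h2] using ihT
    · rw [List.cons_append, List.dropWhile_cons_of_pos (by simpa using h1)]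
      exact ihD

theorem pvLoop_eq (annotated : List (String × Option pvT4)) :
    ∀ (sentences : List (List String)) (paras : List (List pvOut)) (para : List pvOut)
      (c : Int) (pre rest : List pvT4),
      annotated.filterMap Prod.snd = pre ++ rest → (∀ t ∈ pre, t.1 < c) →
      pvBad (annotated.filterMap Prod.snd) c sentences = false →
      sentences.foldl (pvStepA annotated) (paras, para, c)
      = ((sentences.foldl pvStepB (paras, para, c, rest)).1,
         (sentences.foldl pvStepB (paras, para, c, rest)).2.1,
         (sentences.foldl pvStepB (paras, para, c, rest)).2.2.1) := by
  intro sentences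
  induction sentences with
  | nil => intro paras para c pre rest _ _ _; rfl
  | cons s ss ih =>
    intro paras para c pre rest hsplit hpre hbad
    simp only [List.foldl_cons]
    set slen := (s.map PySem.Str.len).sum with hslen
    have hs0 : 0 ≤ slen := pvSlen_nonneg s
    have hce : c ≤ c + slen := by omega
    obtain ⟨hT, hD⟩ := pvPrefix_shift pre rest c (c + slen) hpre hce
    have hrel : pvPick c (c + slen) annotated
        = (rest.takeWhile (fun t => decide (t.1 < c + slen))).filter
            (fun t => decide (c ≤ t.1)) := by
      rw [pvPick_eq, hsplit]
      exact hT
    have hout : (pvMergeTags s (pvPick c (c + slen) annotated) c).map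
        (fun x => (x.1, (if 0 < x.2.1.length then x.2.1.head? else none),
                        (if 0 < x.2.1.length then x.2.2.head? else none)))
        = pvBuildWords ((rest.takeWhile (fun t => decide (t.1 < c + slen))).filter
            (fun t => decide (c ≤ t.1))) c s := by
      rw [hrel]
      unfold pvMergeTags
      have hbs : pvBadSent (annotated.filterMap Prod.snd) c (c + slen) c s = false := by
        simp only [pvBad, Bool.or_eq_false_iff, ← hslen] at hbad
        exact hbad.1
      rw [pvFoldl_merge_eq_recW _ _ c (by
        intro t ht
        have hmemR : t ∈ rest := by
          have h1 := List.mem_filter.mp ht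
          exact (List.takeWhile_sublist _).subset h1.1
        have hmemT : t ∈ annotated.filterMap Prod.snd := by
          rw [hsplit]; exact List.mem_append_right _ hmemR
        have hb1 : c ≤ t.1 := by
          have := (List.mem_filter.mp ht).2; simpa using this
        have hb2 : t.1 < c + slen := by
          have := List.mem_takeWhile_imp (List.mem_filter.mp ht).1; simpa using this
        have := pvBadSent_ok (annotated.filterMap Prod.snd) c (c + slen) s c hbs t hmemT hb1 hb2
        have hmap : List.map ((fun x => x.1) ∘ fun w => (w, ([] : List Int), ([] : List Int))) s
            = s := by simp [Function.comp_def]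
        rw [List.map_map, hmap]
        exact this)]
      rw [pvPostmap_build]
    have hsplit' : annotated.filterMap Prod.snd
        = (pre ++ rest.takeWhile (fun t => decide (t.1 < c + slen)))
          ++ rest.dropWhile (fun t => decide (t.1 < c + slen)) := by
      rw [hsplit, List.append_assoc, List.takeWhile_append_dropWhile]
    have hpre' : ∀ t ∈ pre ++ rest.takeWhile (fun t => decide (t.1 < c + slen)),
        t.1 < c + slen := by
      intro t htm
      rcases List.mem_append.mp htm with hm | hm
      · have := hpre t hm; omega
      · have := List.mem_takeWhile_imp hm
        simpa using this
    have hstep : pvStepA annotated (paras, para, c) s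
        = ((pvStepB (paras, para, c, rest) s).1,
           (pvStepB (paras, para, c, rest) s).2.1,
           (pvStepB (paras, para, c, rest) s).2.2.1) := by
      unfold pvStepA pvStepB
      simp only
      rw [hout]
      split <;> rfl
    have hrest : (pvStepB (paras, para, c, rest) s).2.2.2
        = rest.dropWhile (fun t => decide (t.1 < c + slen)) := by
      unfold pvStepB
      simp only
      split <;> rfl
    rw [hstep]
    have := ih (pvStepB (paras, para, c, rest) s).1 (pvStepB (paras, para, c, rest) s).2.1
      (pvStepB (paras, para, c, rest) s).2.2.1
      (pre ++ rest.takeWhile (fun t => decide (t.1 < c + slen)))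
      (rest.dropWhile (fun t => decide (t.1 < c + slen)))
      hsplit' (by
        intro t htm
        have hx := hpre' t htm
        have : (pvStepB (paras, para, c, rest) s).2.2.1 = c + slen := by
          unfold pvStepB; simp only; split <;> rfl
        omega)
      (by
        have hoff : (pvStepB (paras, para, c, rest) s).2.2.1 = c + slen := by
          unfold pvStepB; simp only; split <;> rfl
        rw [hoff]
        simp only [pvBad, Bool.or_eq_false_iff, ← hslen] at hbad
        exact hbad.2)
    rw [this]
    have hre : ((pvStepB (paras, para, c, rest) s).1,
        (pvStepB (paras, para, c, rest) s).2.1,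
        (pvStepB (paras, para, c, rest) s).2.2.1,
        rest.dropWhile (fun t => decide (t.1 < c + slen)))
        = pvStepB (paras, para, c, rest) s := by
      rw [← hrest]
    rw [hre]

-- ===== VERDICT (by name: the statement is the Claim_ definition above) =====
theorem convert_document_to_labeled_tags_spec : Claim_equal_convert_document_to_labeled_tags := by
  intro annotated sentences _ hpre
  unfold Spec_convert_document_to_labeled_tags
  unfold convert_document_to_labeled_tags convert_document_to_labeled_tags_alt
  have h := pvLoop_eq annotated sentences [] [] 0 [] (annotated.filterMap Prod.snd)
    (by simp) (by simp) hpre.2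
  simp only at h ⊢
  rw [h]
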